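-- pv_equiv track=rewrite | github.com/octerry/Trophee-NSI-2025 | Jeu/Choose.py | max_tab_i
-- ===== SOURCE A (Python) =====
-- def max_tab_i(tab:list):
--     maxi = 0
--     egalite = False
--     for i in range(len(tab)):
--             if tab[i] > maxi:
--                 maxi = tab[i]
--                 egalite = False
--             elif tab[i] == maxi:
--                 egalite = True
--     if egalite:
--         return None
--     else:
--         return maxi
-- ===== SOURCE B (Python) =====
-- def max_tab_i(tab: list):
--     # Simpler: append the 0 floor as a sentinel value, then one max and one count.
--     vals = tab + [0]
--     m = max(vals)
--     if vals.count(m) >= 2: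
--         return None
--     return m
-- ===== Notes on version B (the rewrite author's own statement) =====
-- stated objective: simpler
-- what changed: Replaces the stateful index loop tracking (maxi, egalite) with a declarative computation: append the 0 floor as a sentinel, take max(vals), and report None exactly when that maximum occurs at least twice in vals.
import Mathlib
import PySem

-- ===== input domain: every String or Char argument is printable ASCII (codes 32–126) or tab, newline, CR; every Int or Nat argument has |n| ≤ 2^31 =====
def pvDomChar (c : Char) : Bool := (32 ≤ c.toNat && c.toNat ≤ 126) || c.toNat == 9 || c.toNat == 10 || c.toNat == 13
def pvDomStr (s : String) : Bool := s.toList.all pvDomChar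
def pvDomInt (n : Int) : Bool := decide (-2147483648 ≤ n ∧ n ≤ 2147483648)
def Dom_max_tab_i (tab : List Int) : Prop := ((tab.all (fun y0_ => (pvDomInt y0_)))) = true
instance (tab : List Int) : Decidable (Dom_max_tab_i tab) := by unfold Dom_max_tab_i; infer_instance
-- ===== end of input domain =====

-- B replaces A's stateful (maxi, egalite) index loop with max/count over tab ++ [0] (simpler, same O(n) cost).


-- ===== PORT A =====
def max_tab_i (tab : List Int) : Option Int :=
  let st := (PySem.List.pyRange 0 (PySem.List.len tab) 1).foldl
    (fun (st : Int × Bool) i =>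
      if PySem.List.pyGetD tab i 0 > st.1 then (PySem.List.pyGetD tab i 0, false)
      else if PySem.List.pyGetD tab i 0 = st.1 then (st.1, true)
      else st) (0, false)
  if st.2 then none else some st.1

-- ===== PORT B =====
def max_tab_i_alt (tab : List Int) : Option Int :=
  let vals := tab ++ [0]
  match PySem.List.max? vals (fun y => y) with
  | some m => if 2 ≤ PySem.List.count vals m then none else some m
  | none => none   -- unreachable: vals is never empty

-- ===== PRECONDITION & SPEC =====
def Spec_max_tab_i (tab : List Int) (out : Option Int) : Prop := out = max_tab_i_alt tab
instance (tab : List Int) (out : Option Int) : Decidable (Spec_max_tab_i tab out) := by unfold Spec_max_tab_i; infer_instance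

-- ===== CLAIM (what is proved, stated in full; the proofs are below) =====
def Claim_equal_max_tab_i : Prop := ∀ (tab : List Int), Dom_max_tab_i tab → Spec_max_tab_i tab (max_tab_i tab)

-- ===== LEMMAS AND PROOFS =====

-- A's loop body, named for the proofs.
def pvStepA (st : Int × Bool) (x : Int) : Int × Bool :=
  if x > st.1 then (x, false)
  else if x = st.1 then (st.1, true)
  else st

theorem foldl_max_shift (l : List Int) (a b : Int) :
    l.foldl max (max a b) = max a (l.foldl max b) := by
  induction l generalizing b with
  | nil => rfl
  | cons x t ih =>
    simp only [List.foldl_cons, max_assoc]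
    exact ih (max b x)

theorem loopA_inv (tab : List Int) :
    tab.foldl pvStepA (0, false) =
      (tab.foldl max 0,
       decide (2 ≤ (tab ++ [0]).count (tab.foldl max 0))) := by
  induction tab using List.reverseRecOn with
  | nil => decide
  | append_singleton xs x ih =>
    rw [List.foldl_append, List.foldl_append, ih]
    set M := xs.foldl max 0 with hM
    have hM0 : 0 ≤ M := (PySem.List.le_foldl_max xs 0).1
    have hle : ∀ y ∈ xs, y ≤ M := (PySem.List.le_foldl_max xs 0).2
    by_cases hgt : x > M
    · have hx0 : x ≠ 0 := by omega
      have hnotmem : x ∉ xs := fun h => absurd (hle x h) (by omega)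
      have hcx : xs.count x = 0 := List.count_eq_zero.mpr hnotmem
      simp [pvStepA, hgt, max_eq_right (le_of_lt hgt), List.count_append, hcx, hx0]
    · have hmax : max M x = M := max_eq_left (by omega)
      by_cases heq : x = M
      · subst heq
        have hmem : M ∈ xs ++ [0] := by
          rcases PySem.List.foldl_max_mem xs 0 with h0 | hmem
          · simp only [List.mem_append, List.mem_singleton]
            exact Or.inr (hM.trans h0)
          · exact List.mem_append_left _ hmem
        have hc1 : 1 ≤ List.count M (xs ++ [0]) := List.one_le_count_iff.mpr hmem
        simp only [List.count_append] at hc1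
        simp [pvStepA]
        omega
      · simp [pvStepA, hgt, heq, hmax, List.count_append, List.count_cons]

theorem maxB (tab : List Int) :
    PySem.List.max? (tab ++ [0]) (fun y => y) = some (tab.foldl max 0) := by
  cases tab with
  | nil => decide
  | cons x xs =>
    rw [List.cons_append, PySem.List.max?_id_cons, List.foldl_append]
    simp only [List.foldl_cons, List.foldl_nil]
    congr 1
    have h1 : xs.foldl max (max 0 x) = max 0 (xs.foldl max x) := foldl_max_shift xs 0 x
    rw [h1, max_comm]

-- ===== VERDICT (by name: the statement is the Claim_ definition above) =====
theorem max_tab_i_spec : Claim_equal_max_tab_i := by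
  intro tab _
  unfold Spec_max_tab_i max_tab_i max_tab_i_alt
  have hfold :
      (PySem.List.pyRange 0 (PySem.List.len tab) 1).foldl
        (fun (st : Int × Bool) i =>
          if PySem.List.pyGetD tab i 0 > st.1 then (PySem.List.pyGetD tab i 0, false)
          else if PySem.List.pyGetD tab i 0 = st.1 then (st.1, true)
          else st) (0, false)
      = tab.foldl pvStepA (0, false) := by
    simpa [pvStepA] using
      PySem.List.foldl_pyRange_zero_pyGetD tab 0 pvStepA ((0 : Int), false)
  simp only [hfold, loopA_inv, maxB]
  rw [PySem.List.count_eq]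
  simp
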